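-- pv_equiv track=rewrite | github.com/Peter-Cruz/Python-Files | list_functions_peter.py | plus_lists
-- ===== SOURCE A (Python) =====
-- def plus_lists(number_list, number_list2):
--     number_list2_copy = []
--     for i in number_list2:
--         number_list2_copy.append(i) #I created a copy of list 2 similar to list 1 so the changes made by removing the mutual numbers did not affect the orginal list2.
--
--     for num in number_list: #This for loop takes all of the values in list 1...
--         if num in number_list2_copy: #...And if those values from list 1 are in list 2 copy which is the same as list 2...
--             number_list2_copy.remove(num) #...They are removed here.
--
--     plus = [number_list + number_list2_copy] #Now list 1 and updated list 2 copy are added together to determine the 'plus' list.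
--     return plus
-- ===== SOURCE B (Python) =====
-- def plus_lists(number_list, number_list2):
--     need = {}
--     for n in number_list:
--         need[n] = need.get(n, 0) + 1
--     kept = []
--     for x in number_list2:
--         c = need.get(x, 0)
--         if c:
--             need[x] = c - 1
--         else:
--             kept.append(x)
--     return [number_list + kept]
-- ===== Notes on version B (the rewrite author's own statement) =====
-- stated objective: faster
-- what changed: Replaces the per-element 'in'/'.remove' scans over the copy of list2 with a dict of removal quotas built in one pass over list1 and a single rebuilding pass over list2.
import Mathlib
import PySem

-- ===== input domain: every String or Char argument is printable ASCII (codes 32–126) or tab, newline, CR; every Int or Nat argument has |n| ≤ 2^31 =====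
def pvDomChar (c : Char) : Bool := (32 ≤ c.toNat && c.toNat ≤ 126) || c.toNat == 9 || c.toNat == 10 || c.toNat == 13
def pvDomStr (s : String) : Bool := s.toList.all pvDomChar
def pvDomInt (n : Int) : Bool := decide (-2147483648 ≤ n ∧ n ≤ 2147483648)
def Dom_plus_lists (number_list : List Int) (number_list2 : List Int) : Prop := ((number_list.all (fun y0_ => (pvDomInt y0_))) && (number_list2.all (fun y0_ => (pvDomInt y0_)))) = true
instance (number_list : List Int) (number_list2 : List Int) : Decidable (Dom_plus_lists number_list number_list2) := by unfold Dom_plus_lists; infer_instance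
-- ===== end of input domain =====

-- B replaces A's O(n*m) 'in'/'.remove' scans by a dict of removal quotas and one rebuilding pass over list2 (faster, O(n+m)).

-- ===== PORT A =====
def plus_lists (number_list : List Int) (number_list2 : List Int) : List (List Int) :=
  -- copy loop: number_list2_copy = []; for i in number_list2: number_list2_copy.append(i)
  let number_list2_copy := number_list2.foldl (fun acc i => acc ++ [i]) []
  -- for num in number_list: if num in copy: copy.remove(num)
  let number_list2_copy := number_list.foldl
    (fun c num =>
      if num ∈ c then
        match PySem.List.remove? c num with
        | some c' => c'
        | none => c
      else c) number_list2_copy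
  [number_list ++ number_list2_copy]

-- ===== PORT B =====
-- the second loop of Source B: consumes list2, skipping while a quota remains (decrementing it), keeping otherwise
def pvAltFilter (need : PySem.Dict Int Int) : List Int → List Int
  | [] => []
  | x :: xs =>
    let c := need.getD x 0
    if c ≠ 0 then pvAltFilter (need.insert x (c - 1)) xs
    else x :: pvAltFilter need xs

def plus_lists_alt (number_list : List Int) (number_list2 : List Int) : List (List Int) :=
  -- need = {}; for n in number_list: need[n] = need.get(n, 0) + 1
  let need := number_list.foldl (fun d n => d.modify n 0 (· + 1)) PySem.Dict.empty
  [number_list ++ pvAltFilter need number_list2]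

-- ===== PRECONDITION & SPEC =====
def Spec_plus_lists (number_list : List Int) (number_list2 : List Int) (out : List (List Int)) : Prop := out = plus_lists_alt number_list number_list2
instance (number_list : List Int) (number_list2 : List Int) (out : List (List Int)) : Decidable (Spec_plus_lists number_list number_list2 out) := by unfold Spec_plus_lists; infer_instance

-- ===== CLAIM (what is proved, stated in full; the proofs are below) =====
def Claim_equal_plus_lists : Prop := ∀ (number_list : List Int) (number_list2 : List Int), Dom_plus_lists number_list number_list2 → Spec_plus_lists number_list number_list2 (plus_lists number_list number_list2)

-- ===== LEMMAS AND PROOFS =====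

-- abstract quota-filter: both sides reduce to this
def pvF (q : Int → Nat) : List Int → List Int
  | [] => []
  | x :: xs => if q x = 0 then x :: pvF q xs else pvF (Function.update q x (q x - 1)) xs

lemma pvAppend_copy (l : List Int) (acc : List Int) :
    l.foldl (fun acc i => acc ++ [i]) acc = acc ++ l := by
  induction l generalizing acc with
  | nil => simp
  | cons x xs ih => simp [List.foldl, ih]

lemma pvA_step (c : List Int) (num : Int) :
    (if num ∈ c then
        match PySem.List.remove? c num with
        | some c' => c'
        | none => c
      else c) = c.erase num := by
  by_cases h : num ∈ c
  · simp [h, PySem.List.remove?_eq_some_erase c num h]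
  · simp [h, List.erase_of_not_mem h]

-- incrementing the quota of n equals first erasing n's first occurrence
lemma pvF_update (c : List Int) (q : Int → Nat) (n : Int) :
    pvF (Function.update q n (q n + 1)) c = pvF q (c.erase n) := by
  induction c generalizing q with
  | nil => simp [pvF]
  | cons x xs ih =>
    by_cases hx : x = n
    · subst hx
      have h1 : Function.update q x (q x + 1) x = q x + 1 := by simp
      simp only [pvF, h1, List.erase_cons_head]
      have hnz : (q x + 1) ≠ 0 := by omega
      simp only [hnz, if_false]
      have hupd : Function.update (Function.update q x (q x + 1)) x (q x + 1 - 1) = q := by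
        funext y
        by_cases hy : y = x <;> simp [Function.update, hy]
      rw [hupd]
    · have hne : x ≠ n := hx
      have h1 : Function.update q n (q n + 1) x = q x := by
        simp [Function.update, hne]
      rw [List.erase_cons_tail (by simpa using hne)]
      by_cases hqx : q x = 0
      · simp [pvF, h1, hqx, ih]
      · simp only [pvF, h1, if_neg hqx]
        have hcomm : Function.update (Function.update q n (q n + 1)) x (q x - 1)
            = Function.update (Function.update q x (q x - 1)) n
                ((Function.update q x (q x - 1)) n + 1) := by
          funext y
          by_cases hyx : y = x <;> by_cases hyn : y = n <;>
            simp_all [Function.update]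
        rw [hcomm, ih]

-- A's second loop equals the quota filter at quota = count in list1
lemma pvA_loop (l1 : List Int) (c : List Int) :
    l1.foldl (fun c num =>
      if num ∈ c then
        match PySem.List.remove? c num with
        | some c' => c'
        | none => c
      else c) c = pvF (fun v => l1.count v) c := by
  induction l1 generalizing c with
  | nil =>
    induction c with
    | nil => simp [pvF]
    | cons x xs ihc => simp [pvF, List.count_nil] at ihc ⊢; simpa using ihc
  | cons n l1 ih =>
    simp only [List.foldl_cons]
    rw [pvA_step c n, ih]
    have hq : (fun v => (n :: l1).count v) = Function.update (fun v => l1.count v) n (l1.count n + 1) := by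
      funext v
      by_cases hv : v = n
      · subst hv; simp [Function.update]
      · simp [Function.update, hv, Ne.symm hv]
    rw [hq]
    exact (pvF_update c (fun v => l1.count v) n).symm

-- B's filter equals the quota filter whenever the dict represents the quota
lemma pvAltFilter_eq (c : List Int) (need : PySem.Dict Int Int) (q : Int → Nat)
    (h : ∀ v, need.getD v 0 = (q v : Int)) :
    pvAltFilter need c = pvF q c := by
  induction c generalizing need q with
  | nil => rfl
  | cons x xs ih =>
    simp only [pvAltFilter, pvF, h x]
    by_cases hqx : q x = 0
    · simp only [hqx, Int.natCast_zero, ne_eq, not_true_eq_false, if_false]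
      exact congrArg _ (ih need q h)
    · have hne : ((q x : Int)) ≠ 0 := by exact_mod_cast hqx
      simp only [hne, ne_eq, not_false_eq_true, if_true, hqx]
      apply ih
      intro v
      by_cases hv : v = x
      · subst hv
        rw [PySem.Dict.getD_insert_self]
        simp [Function.update]
        omega
      · rw [PySem.Dict.getD_insert_of_ne _ _ _ (by simpa using hv)]
        simp [Function.update, hv, h v]

-- ===== VERDICT (by name: the statement is the Claim_ definition above) =====
theorem plus_lists_spec : Claim_equal_plus_lists := by
  intro l1 l2 _
  unfold Spec_plus_lists plus_lists plus_lists_alt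
  simp only [pvAppend_copy, List.nil_append]
  rw [pvA_loop, pvAltFilter_eq l2 _ (fun v => l1.count v)]
  intro v
  rw [PySem.Dict.getD_foldl_modify_add_one]
  simp
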